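-- pv_equiv track=rewrite | github.com/k-harada/AtCoder | ABC/ABC251-300/ABC261/E.py | solve
-- ===== SOURCE A (Python) =====
-- def solve(n, c, ta_list):
--     base_00_list = [0]
--     base_30_list = [2 ** 30 - 1]
--     for t, a in ta_list:
--         if t == 1:
--             base_00_list.append(base_00_list[-1] & a)
--             base_30_list.append(base_30_list[-1] & a)
--         elif t == 2:
--             base_00_list.append(base_00_list[-1] | a)
--             base_30_list.append(base_30_list[-1] | a)
--         else:
--             base_00_list.append(base_00_list[-1] ^ a)
--             base_30_list.append(base_30_list[-1] ^ a)
--     res_list = []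
--     r = c
--     for i in range(n):
--         r = (r & base_30_list[i + 1]) | ((r ^ (2 ** 30 - 1)) & base_00_list[i + 1])
--         res_list.append(r)
--     return res_list
-- ===== SOURCE B (Python) =====
-- def solve(n, c, ta_list):
--     # Fused single pass: carry the two composed-operation scalars and the running
--     # result instead of building the two prefix tables first.
--     mask = (1 << 30) - 1
--     b00, b30, r = 0, mask, c
--     res_list = []
--     for i in range(n):
--         t, a = ta_list[i]
--         if t == 1:
--             b00 &= a
--             b30 &= a
--         elif t == 2:
--             b00 |= a
--             b30 |= a
--         else:
--             b00 ^= a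
--             b30 ^= a
--         r = (r & b30) | ((r ^ mask) & b00)
--         res_list.append(r)
--     return res_list
-- ===== Notes on version B (the rewrite author's own statement) =====
-- stated objective: alternative
-- what changed: B replaces A's two-phase algorithm (build two full prefix tables of composed masks over all of ta_list, then a second indexed pass over them) with one fused pass that carries just two scalar masks and the running result, using O(1) extra memory and never materialising the tables.
import Mathlib
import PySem

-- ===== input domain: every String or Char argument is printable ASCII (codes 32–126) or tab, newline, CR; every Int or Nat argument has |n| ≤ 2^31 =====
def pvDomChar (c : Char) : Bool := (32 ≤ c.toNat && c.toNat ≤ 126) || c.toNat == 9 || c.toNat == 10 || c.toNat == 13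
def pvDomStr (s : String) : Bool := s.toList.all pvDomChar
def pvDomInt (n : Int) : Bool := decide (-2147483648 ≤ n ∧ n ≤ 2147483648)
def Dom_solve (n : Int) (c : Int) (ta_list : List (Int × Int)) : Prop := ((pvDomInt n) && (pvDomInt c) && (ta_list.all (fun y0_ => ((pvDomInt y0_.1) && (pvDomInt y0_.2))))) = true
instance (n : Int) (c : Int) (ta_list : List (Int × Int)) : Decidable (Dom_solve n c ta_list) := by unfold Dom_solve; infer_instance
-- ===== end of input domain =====

-- B fuses A's two phases (prefix-table build + indexed pass) into one pass carrying two scalar masks and the running result.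


-- ===== PORT A =====
-- builds the two prefix tables (tails after the initial 0 / 2^30-1 entries)
def buildTables : Int → Int → List (Int × Int) → List Int × List Int
  | _, _, [] => ([], [])
  | p00, p30, (t, a) :: rest =>
    let n00 := if t = 1 then PySem.Int.band p00 a else if t = 2 then PySem.Int.bor p00 a else PySem.Int.bxor p00 a
    let n30 := if t = 1 then PySem.Int.band p30 a else if t = 2 then PySem.Int.bor p30 a else PySem.Int.bxor p30 a
    let rec_ := buildTables n00 n30 rest
    (n00 :: rec_.1, n30 :: rec_.2)

-- 'for i in range(n)' indexing base_xx_list[i + 1]; returns the partial list where Python raises IndexError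
def loopA (b00 b30 : List Int) : Nat → Int → Int → List Int
  | 0, _, _ => []
  | k + 1, i, r =>
    match PySem.List.pyGet? b30 (i + 1), PySem.List.pyGet? b00 (i + 1) with
    | some v30, some v00 =>
      let r' := PySem.Int.bor (PySem.Int.band r v30) (PySem.Int.band (PySem.Int.bxor r (2 ^ 30 - 1)) v00)
      r' :: loopA b00 b30 k (i + 1) r'
    | _, _ => []

def solve (n : Int) (c : Int) (ta_list : List (Int × Int)) : List Int :=
  let tabs := buildTables 0 (2 ^ 30 - 1) ta_list
  loopA (0 :: tabs.1) ((2 ^ 30 - 1) :: tabs.2) n.toNat 0 c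

-- ===== PORT B =====
-- single fused pass: 'for i in range(n)' with running scalars b00, b30, r
def loopB (ta : List (Int × Int)) : Nat → Int → Int → Int → Int → List Int
  | 0, _, _, _, _ => []
  | k + 1, i, b00, b30, r =>
    match PySem.List.pyGet? ta i with
    | some (t, a) =>
      let b00' := if t = 1 then PySem.Int.band b00 a else if t = 2 then PySem.Int.bor b00 a else PySem.Int.bxor b00 a
      let b30' := if t = 1 then PySem.Int.band b30 a else if t = 2 then PySem.Int.bor b30 a else PySem.Int.bxor b30 a
      let r' := PySem.Int.bor (PySem.Int.band r b30') (PySem.Int.band (PySem.Int.bxor r (2 ^ 30 - 1)) b00')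
      r' :: loopB ta k (i + 1) b00' b30' r'
    | none => []

def solve_alt (n : Int) (c : Int) (ta_list : List (Int × Int)) : List Int :=
  loopB ta_list n.toNat 0 0 (2 ^ 30 - 1) c

-- ===== PRECONDITION & SPEC =====
-- Pre_ excludes exactly n > len(ta_list), on which Python A (and B) raises IndexError.
def Pre_solve (n : Int) (c : Int) (ta_list : List (Int × Int)) : Prop := n ≤ ta_list.length
instance (n : Int) (c : Int) (ta_list : List (Int × Int)) : Decidable (Pre_solve n c ta_list) := by unfold Pre_solve; infer_instance
def pvWitness_solve : Int × Int × (List (Int × Int)) := (2, 5, [(1, 3), (3, 6)])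

def Spec_solve (n : Int) (c : Int) (ta_list : List (Int × Int)) (out : List Int) : Prop := out = solve_alt n c ta_list
instance (n : Int) (c : Int) (ta_list : List (Int × Int)) (out : List Int) : Decidable (Spec_solve n c ta_list out) := by unfold Spec_solve; infer_instance

-- ===== CLAIM (what is proved, stated in full; the proofs are below) =====
def Claim_equal_solve : Prop := ∀ (n : Int) (c : Int) (ta_list : List (Int × Int)), Dom_solve n c ta_list → Pre_solve n c ta_list → Spec_solve n c ta_list (solve n c ta_list)

-- ===== LEMMAS AND PROOFS =====

theorem pyGet?_cons_one {α : Type} (x y : α) (l : List α) :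
    PySem.List.pyGet? (x :: y :: l) 1 = some y := by
  have h := PySem.List.pyGet?_cons_succ (x := x) (xs := y :: l) (n := 0)
  simpa using h

-- shifting one element off the front while bumping the index leaves loopA unchanged
theorem loopA_shift (b00 b30 : List Int) (x y : Int) (k : Nat) (i : Nat) (r : Int) :
    loopA (x :: b00) (y :: b30) k ((i : Int) + 1) r = loopA b00 b30 k (i : Int) r := by
  induction k generalizing i r with
  | zero => simp [loopA]
  | succ k ih =>
    simp only [loopA]
    have h30 : PySem.List.pyGet? (y :: b30) ((i : Int) + 1 + 1) = PySem.List.pyGet? b30 ((i : Int) + 1) := by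
      have : ((i : Int) + 1 + 1) = (((i + 1 : Nat) : Int) + 1) := by push_cast; ring
      rw [this, PySem.List.pyGet?_cons_succ]; push_cast; ring_nf
    have h00 : PySem.List.pyGet? (x :: b00) ((i : Int) + 1 + 1) = PySem.List.pyGet? b00 ((i : Int) + 1) := by
      have : ((i : Int) + 1 + 1) = (((i + 1 : Nat) : Int) + 1) := by push_cast; ring
      rw [this, PySem.List.pyGet?_cons_succ]; push_cast; ring_nf
    rw [h30, h00]
    cases hg30 : PySem.List.pyGet? b30 ((i : Int) + 1) with
    | none => rfl
    | some v30 =>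
      cases hg00 : PySem.List.pyGet? b00 ((i : Int) + 1) with
      | none => rfl
      | some v00 =>
        simp only []
        have h := ih (i + 1)
        push_cast at h ⊢
        rw [h]

theorem loopB_shift (ta : List (Int × Int)) (p : Int × Int) (k : Nat) (i : Nat) (b00 b30 r : Int) :
    loopB (p :: ta) k ((i : Int) + 1) b00 b30 r = loopB ta k (i : Int) b00 b30 r := by
  induction k generalizing i b00 b30 r with
  | zero => simp [loopB]
  | succ k ih =>
    simp only [loopB, PySem.List.pyGet?_cons_succ]
    cases hg : PySem.List.pyGet? ta (i : Int) with
    | none => rfl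
    | some q =>
      obtain ⟨t, a⟩ := q
      simp only []
      have h := ih (i + 1)
      push_cast at h ⊢
      rw [h]

-- the fused loop agrees with the table pass, for any start state
theorem loopA_eq_loopB (ta : List (Int × Int)) (k : Nat) (p00 p30 r : Int) (hk : k ≤ ta.length) :
    loopA (p00 :: (buildTables p00 p30 ta).1) (p30 :: (buildTables p00 p30 ta).2) k 0 r
      = loopB ta k 0 p00 p30 r := by
  induction ta generalizing k p00 p30 r with
  | nil =>
    have : k = 0 := by simpa using hk
    subst this
    simp [loopA, loopB]
  | cons hd tl ih =>
    obtain ⟨t, a⟩ := hd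
    cases k with
    | zero => simp [loopA, loopB]
    | succ k =>
      simp only [buildTables, loopA, loopB, PySem.List.pyGet?_zero_cons]
      norm_num [pyGet?_cons_one]
      set n00 := if t = 1 then PySem.Int.band p00 a else if t = 2 then PySem.Int.bor p00 a else PySem.Int.bxor p00 a with hn00
      set n30 := if t = 1 then PySem.Int.band p30 a else if t = 2 then PySem.Int.bor p30 a else PySem.Int.bxor p30 a with hn30
      have hA := loopA_shift (n00 :: (buildTables n00 n30 tl).1) (n30 :: (buildTables n00 n30 tl).2) p00 p30 k 0
      have hB := loopB_shift tl (t, a) k 0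
      push_cast at hA hB
      rw [hA, hB, ih k n00 n30 _ (by simp at hk; omega)]

-- ===== VERDICT (by name: the statement is the Claim_ definition above) =====
theorem solve_spec : Claim_equal_solve := by
  intro n c ta_list _ hpre
  unfold Spec_solve solve solve_alt
  exact loopA_eq_loopB ta_list n.toNat 0 (2 ^ 30 - 1) c (by
    unfold Pre_solve at hpre; omega)
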